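-- pv_equiv track=rewrite | github.com/Rafat-Pantho/DS-LAB-4304 | LAB 09/220041102_T07L09_1B_chatCPT.py | is_abbreviation_in_list
-- ===== SOURCE A (Python) =====
-- def is_abbreviation_in_list(word_list, abbreviation):
--     for word in word_list:
--         index = 0  # Index to track position in the abbreviation
--         for char in word:
--             if index < len(abbreviation) and char == abbreviation[index]:
--                 index += 1
--         # If all characters of abbreviation are found in sequence
--         if index == len(abbreviation):
--             return "YES"
--     return "NO"
-- ===== SOURCE B (Python) =====
-- def is_abbreviation_in_list(word_list, abbreviation):
--     for word in word_list:
--         # Build an inverted index: each character -> sorted list of its positions in the word.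
--         positions = {}
--         for i, c in enumerate(word):
--             positions.setdefault(c, []).append(i)
--         # Walk the abbreviation, jumping to the next occurrence via binary search.
--         prev = -1
--         ok = True
--         for ch in abbreviation:
--             lst = positions.get(ch)
--             if lst is None or lst[-1] <= prev:
--                 ok = False
--                 break
--             lo, hi = 0, len(lst)
--             while lo < hi:
--                 mid = (lo + hi) // 2
--                 if lst[mid] > prev:
--                     hi = mid
--                 else:
--                     lo = mid + 1
--             prev = lst[lo]
--         if ok:
--             return "YES"
--     return "NO"
-- ===== Notes on version B (the rewrite author's own statement) =====
-- stated objective: alternative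
-- what changed: B replaces A's per-word index walk with a different data structure: for each word it builds an inverted index (character -> sorted list of positions) and then walks the abbreviation, jumping to the next admissible occurrence of each character via a hand-written binary search over that character's position list.
import Mathlib
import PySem

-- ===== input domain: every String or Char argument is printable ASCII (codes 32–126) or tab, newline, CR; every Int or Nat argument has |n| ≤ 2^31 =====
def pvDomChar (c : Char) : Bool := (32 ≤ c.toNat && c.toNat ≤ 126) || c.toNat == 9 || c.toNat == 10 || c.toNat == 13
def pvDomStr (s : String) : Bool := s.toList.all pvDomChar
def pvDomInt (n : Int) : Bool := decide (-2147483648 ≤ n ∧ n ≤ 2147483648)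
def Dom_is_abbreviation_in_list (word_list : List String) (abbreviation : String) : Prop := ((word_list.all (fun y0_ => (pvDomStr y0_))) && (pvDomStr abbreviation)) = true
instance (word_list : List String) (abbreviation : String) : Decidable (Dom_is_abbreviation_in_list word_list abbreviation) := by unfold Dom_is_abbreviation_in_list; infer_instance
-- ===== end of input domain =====

-- B re-implements the check with a different data structure per word: an inverted index mapping each character
-- to its (sorted) list of positions, then a walk over the abbreviation that jumps to the next occurrence by
-- hand-written binary search, instead of A's index walk over the word's characters (objective: alternative).


-- ===== PORT A =====
-- inner loop: `for char in word: if index < len(abbreviation) and char == abbreviation[index]: index += 1`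
def pvStepA (abbr : List Char) (index : Nat) (char : Char) : Nat :=
  if index < abbr.length && abbr[index]? == some char then index + 1 else index

def is_abbreviation_in_list (word_list : List String) (abbreviation : String) : String :=
  match word_list with
  | [] => "NO"
  | word :: rest =>
      let index := word.toList.foldl (pvStepA abbreviation.toList) 0
      if index = abbreviation.toList.length then "YES"
      else is_abbreviation_in_list rest abbreviation

-- ===== PORT B =====
-- `for i, c in enumerate(word): positions.setdefault(c, []).append(i)`
def pvBuildAux (d : PySem.Dict Char (List Int)) (i : Int) (xs : List Char) : PySem.Dict Char (List Int) :=
  match xs with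
  | [] => d
  | c :: rest => pvBuildAux (d.insert c (d.getD c [] ++ [i])) (i + 1) rest

-- `while lo < hi: mid = (lo+hi)//2; ...` (mid is always in range when called with hi ≤ len(lst), so lst[mid] is getD mid 0)
def pvBsearch (lst : List Int) (prev : Int) (lo hi : Nat) : Nat :=
  if lo < hi then
    let mid := (lo + hi) / 2
    if lst.getD mid 0 > prev then pvBsearch lst prev lo mid
    else pvBsearch lst prev (mid + 1) hi
  else lo
termination_by hi - lo
decreasing_by all_goals omega

-- `for ch in abbreviation: ...` with the break/ok flag rendered as recursion
def pvWalk (d : PySem.Dict Char (List Int)) (prev : Int) (abbr : List Char) : Bool :=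
  match abbr with
  | [] => true
  | ch :: chs =>
      match d.get? ch with
      | none => false                                   -- `lst is None`
      | some lst =>
          match PySem.List.pyGet? lst (-1) with         -- `lst[-1]` (stored lists are nonempty, so never IndexError)
          | none => false
          | some lastv =>
              if lastv ≤ prev then false
              else
                let lo := pvBsearch lst prev 0 lst.length
                match PySem.List.pyGet? lst (Int.ofNat lo) with   -- `lst[lo]` (lo < len here)
                | none => false
                | some v => pvWalk d v chs

def is_abbreviation_in_list_alt (word_list : List String) (abbreviation : String) : String :=
  match word_list with
  | [] => "NO"
  | word :: rest =>
      if pvWalk (pvBuildAux PySem.Dict.empty 0 word.toList) (-1) abbreviation.toList then "YES"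
      else is_abbreviation_in_list_alt rest abbreviation

-- ===== PRECONDITION & SPEC =====
def Spec_is_abbreviation_in_list (word_list : List String) (abbreviation : String) (out : String) : Prop := out = is_abbreviation_in_list_alt word_list abbreviation
instance (word_list : List String) (abbreviation : String) (out : String) : Decidable (Spec_is_abbreviation_in_list word_list abbreviation out) := by unfold Spec_is_abbreviation_in_list; infer_instance

-- ===== CLAIM (what is proved, stated in full; the proofs are below) =====
def Claim_equal_is_abbreviation_in_list : Prop := ∀ (word_list : List String) (abbreviation : String), Dom_is_abbreviation_in_list word_list abbreviation → Spec_is_abbreviation_in_list word_list abbreviation (is_abbreviation_in_list word_list abbreviation)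

-- ===== LEMMAS AND PROOFS =====

-- occurrence list of c in xs, positions counted from i (what pvBuildAux stores per key)
def pvOcc (xs : List Char) (c : Char) (i : Int) : List Int :=
  match xs with
  | [] => []
  | x :: rest => if x = c then i :: pvOcc rest c (i + 1) else pvOcc rest c (i + 1)

-- greedy subsequence check used as the reference point of both proofs
def pvGreedy (abbr : List Char) (it : List Char) : Bool :=
  match abbr with
  | [] => true
  | ch :: chs =>
      match it.dropWhile (fun c => c ≠ ch) with
      | [] => false
      | _ :: it' => pvGreedy chs it'

theorem pvGreedy_iff_sublist : ∀ (it abbr : List Char), pvGreedy abbr it = true ↔ List.Sublist abbr it := by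
  intro it
  induction it with
  | nil =>
      intro abbr
      cases abbr with
      | nil => simp [pvGreedy]
      | cons a as => simp [pvGreedy, List.dropWhile]
  | cons c w ih =>
      intro abbr
      cases abbr with
      | nil => simp [pvGreedy]
      | cons a as =>
          by_cases h : c = a
          · subst h
            simp only [pvGreedy, List.dropWhile, ne_eq, not_true_eq_false, decide_false]
            rw [ih as]
            exact (List.cons_sublist_cons).symm
          · have hd : (fun x => decide ¬(x = a)) c = true := by simp [h]
            simp only [pvGreedy, List.dropWhile, ne_eq, hd]
            have : (match List.dropWhile (fun x => decide ¬(x = a)) w with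
                     | [] => false
                     | _ :: it' => pvGreedy as it') = pvGreedy (a :: as) w := by
              simp [pvGreedy]
            rw [this, ih (a :: as)]
            constructor
            · exact fun hs => hs.cons c
            · intro hs
              cases hs with
              | cons _ hs => exact hs
              | cons₂ _ hs => exact absurd rfl h


theorem foldl_stepA_iff_sublist : ∀ (w abbr : List Char) (i : Nat), i ≤ abbr.length →
    (w.foldl (pvStepA abbr) i = abbr.length ↔ List.Sublist (abbr.drop i) w) := by
  intro w
  induction w with
  | nil =>
      intro abbr i hi
      simp only [List.foldl_nil, List.sublist_nil, List.drop_eq_nil_iff]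
      omega
  | cons c w' ih =>
      intro abbr i hi
      simp only [List.foldl_cons]
      by_cases hlt : i < abbr.length
      · have hdrop : abbr.drop i = abbr[i] :: abbr.drop (i + 1) := List.drop_eq_getElem_cons hlt
        by_cases hc : abbr[i] = c
        · have hstep : pvStepA abbr i c = i + 1 := by
            simp [pvStepA, hlt, hc]
          rw [hstep, ih abbr (i + 1) (by omega), hdrop, hc]
          exact (List.cons_sublist_cons).symm
        · have hstep : pvStepA abbr i c = i := by
            simp [pvStepA, List.getElem?_eq_getElem hlt, hc]
          rw [hstep, ih abbr i hi, hdrop]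
          constructor
          · intro hs
            exact hs.cons c
          · intro hs
            cases hs with
            | cons _ hs => exact hs
            | cons₂ _ hs => exact absurd rfl hc
      · have hi' : i = abbr.length := by omega
        subst hi'
        have hstep : pvStepA abbr abbr.length c = abbr.length := by
          simp [pvStepA]
        rw [hstep, ih abbr abbr.length le_rfl]
        simp

theorem pvBuildAux_get? : ∀ (xs : List Char) (i : Int) (d : PySem.Dict Char (List Int)) (c : Char),
    (pvBuildAux d i xs).get? c =
      (if pvOcc xs c i = [] then d.get? c else some (d.getD c [] ++ pvOcc xs c i)) := by
  intro xs
  induction xs with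
  | nil => intro i d c; simp [pvBuildAux, pvOcc]
  | cons x rest ih =>
      intro i d c
      simp only [pvBuildAux, pvOcc]
      rw [ih]
      by_cases hx : x = c
      · subst hx
        rw [PySem.Dict.get?_insert_self, PySem.Dict.getD_insert_self]
        by_cases h0 : pvOcc rest x (i + 1) = []
        · simp [h0]
        · simp [h0, List.append_assoc]
      · simp only [if_neg hx]
        rw [PySem.Dict.get?_insert_of_ne (hne := Ne.symm hx), PySem.Dict.getD_insert_of_ne (hne := Ne.symm hx)]

theorem pvOcc_ge : ∀ (xs : List Char) (c : Char) (i j : Int), j ∈ pvOcc xs c i → i ≤ j := by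
  intro xs
  induction xs with
  | nil => intro c i j h; simp [pvOcc] at h
  | cons x rest ih =>
      intro c i j h
      simp only [pvOcc] at h
      by_cases hx : x = c
      · rw [if_pos hx] at h
        rcases List.mem_cons.mp h with h | h
        · omega
        · have := ih c (i+1) j h; omega
      · rw [if_neg hx] at h
        have := ih c (i+1) j h; omega

theorem pvOcc_sorted : ∀ (xs : List Char) (c : Char) (i : Int), (pvOcc xs c i).Pairwise (· < ·) := by
  intro xs
  induction xs with
  | nil => intro c i; simp [pvOcc]
  | cons x rest ih =>
      intro c i
      simp only [pvOcc]
      by_cases hx : x = c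
      · rw [if_pos hx]
        exact List.Pairwise.cons (fun j hj => by have := pvOcc_ge rest c (i+1) j hj; omega) (ih c (i+1))
      · rw [if_neg hx]; exact ih c (i+1)

theorem pvOcc_nil_iff : ∀ (xs : List Char) (c : Char) (i : Int), pvOcc xs c i = [] ↔ c ∉ xs := by
  intro xs
  induction xs with
  | nil => intro c i; simp [pvOcc]
  | cons x rest ih =>
      intro c i
      simp only [pvOcc, List.mem_cons]
      by_cases hx : x = c
      · simp [hx]
      · rw [if_neg hx, ih]
        simp [Ne.symm hx]
theorem pvOcc_dropWhile : ∀ (xs : List Char) (c : Char) (m : Nat) (i : Int),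
    (pvOcc xs c i).dropWhile (fun x => decide (x < i + m)) = pvOcc (xs.drop m) c (i + m) := by
  intro xs
  induction xs with
  | nil => intro c m i; simp [pvOcc]
  | cons x rest ih =>
      intro c m i
      cases m with
      | zero =>
          simp only [Nat.cast_zero, add_zero, List.drop_zero]
          cases hocc : pvOcc (x :: rest) c i with
          | nil => simp
          | cons j t =>
              have hj : i ≤ j := pvOcc_ge (x :: rest) c i j (by rw [hocc]; exact List.mem_cons_self)
              rw [List.dropWhile_cons]
              rw [show (decide (j < i)) = false by simp; omega]; simp
      | succ m' =>
          simp only [pvOcc, List.drop_succ_cons]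
          have hpred : (fun x => decide (x < i + ((m' + 1 : Nat) : Int))) =
              (fun x => decide (x < (i + 1) + ((m' : Nat) : Int))) := by
            funext z; simp only [decide_eq_decide]; push_cast; omega
          have harith : (i + 1) + ((m' : Nat) : Int) = i + ((m' + 1 : Nat) : Int) := by push_cast; ring
          by_cases hx : x = c
          · rw [if_pos hx, List.dropWhile_cons]
            have hcond : (decide (i < i + ((m' + 1 : Nat) : Int))) = true := by simp
            rw [hcond, if_pos rfl, hpred, ih c m' (i + 1), harith]
          · rw [if_neg hx, hpred, ih c m' (i + 1), harith]
theorem pvOcc_head : ∀ (l : List Char) (c : Char) (i : Int) (j : Int) (t : List Int),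
    pvOcc l c i = j :: t →
    ∃ k : Nat, j = i + k ∧ (l.takeWhile (fun x => x ≠ c)).length = k ∧
      t = pvOcc ((l.dropWhile (fun x => x ≠ c)).tail) c (j + 1) := by
  intro l
  induction l with
  | nil => intro c i j t h; simp [pvOcc] at h
  | cons x rest ih =>
      intro c i j t h
      simp only [pvOcc] at h
      by_cases hx : x = c
      · rw [if_pos hx] at h
        injection h with hj ht
        refine ⟨0, by omega, ?_, ?_⟩
        · simp [hx]
        · subst hx hj
          simp [ht]
      · rw [if_neg hx] at h
        obtain ⟨k, hk1, hk2, hk3⟩ := ih c (i + 1) j t h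
        refine ⟨k + 1, by omega, ?_, ?_⟩
        · simp only [List.takeWhile_cons, ne_eq, decide_not] at hk2 ⊢
          simp [hx, hk2]
        · simp only [List.dropWhile_cons]
          simp [hx, hk3]

theorem dropWhile_eq_drop_of : ∀ (lst : List Int) (p : Int → Bool) (r : Nat),
    (∀ k, k < r → ∀ h : k < lst.length, p lst[k] = true) →
    (∀ k, r ≤ k → ∀ h : k < lst.length, p lst[k] = false) →
    lst.dropWhile p = lst.drop r := by
  intro lst
  induction lst with
  | nil => intro p r _ _; simp
  | cons a as ih =>
      intro p r h1 h2
      cases r with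
      | zero =>
          have := h2 0 (Nat.zero_le _) (by simp)
          simp only [List.getElem_cons_zero] at this
          simp [this]
      | succ r' =>
          have ha := h1 0 (Nat.succ_pos _) (by simp)
          simp only [List.getElem_cons_zero] at ha
          rw [List.dropWhile_cons]
          rw [ha, if_pos rfl, List.drop_succ_cons]
          exact ih p r' (fun k hk h => h1 (k+1) (by omega) (by simpa using h))
                       (fun k hk h => h2 (k+1) (by omega) (by simpa using h))

theorem sorted_le_getLast : ∀ (l : List Int), l.Pairwise (· < ·) → ∀ x ∈ l, ∀ h : l ≠ [],
    x ≤ l.getLast h := by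
  intro l hs x hx h
  obtain ⟨idx, hidx, hget⟩ := List.mem_iff_getElem.mp hx
  rw [List.getLast_eq_getElem]
  rcases Nat.lt_or_ge idx (l.length - 1) with hlt | hge
  · exact le_of_lt (hget ▸ (List.pairwise_iff_getElem.mp hs) idx (l.length - 1) hidx (by omega) hlt)
  · rw [← hget]
    exact le_of_eq (by congr 1; omega)

theorem pvBsearch_spec : ∀ (lst : List Int) (prev : Int), lst.Pairwise (· < ·) →
    ∀ (lo hi : Nat), lo ≤ hi → hi ≤ lst.length →
    (∀ k, k < lo → ∀ h : k < lst.length, lst[k] ≤ prev) →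
    (∀ k, hi ≤ k → ∀ h : k < lst.length, prev < lst[k]) →
    lo ≤ pvBsearch lst prev lo hi ∧ pvBsearch lst prev lo hi ≤ hi ∧
    (∀ k, k < pvBsearch lst prev lo hi → ∀ h : k < lst.length, lst[k] ≤ prev) ∧
    (∀ k, pvBsearch lst prev lo hi ≤ k → ∀ h : k < lst.length, prev < lst[k]) := by
  intro lst prev hsort
  have mono : ∀ a b (ha : a < lst.length) (hb : b < lst.length), a ≤ b →
      lst[a]'ha ≤ lst[b]'hb := by
    intro a b ha hb hab
    rcases Nat.lt_or_eq_of_le hab with h | h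
    · exact le_of_lt ((List.pairwise_iff_getElem.mp hsort) a b ha hb h)
    · subst h; exact le_rfl
  suffices H : ∀ n lo hi, hi - lo ≤ n → lo ≤ hi → hi ≤ lst.length →
      (∀ k, k < lo → ∀ h : k < lst.length, lst[k] ≤ prev) →
      (∀ k, hi ≤ k → ∀ h : k < lst.length, prev < lst[k]) →
      lo ≤ pvBsearch lst prev lo hi ∧ pvBsearch lst prev lo hi ≤ hi ∧
      (∀ k, k < pvBsearch lst prev lo hi → ∀ h : k < lst.length, lst[k] ≤ prev) ∧
      (∀ k, pvBsearch lst prev lo hi ≤ k → ∀ h : k < lst.length, prev < lst[k]) by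
    exact fun lo hi h1 h2 h3 h4 => H (hi - lo) lo hi le_rfl h1 h2 h3 h4
  intro n
  induction n with
  | zero =>
      intro lo hi hn hle hhi h1 h2
      have heq : ¬ lo < hi := by omega
      rw [pvBsearch, if_neg heq]
      exact ⟨le_rfl, hle, h1, fun k hk h => h2 k (by omega) h⟩
  | succ n ih =>
      intro lo hi hn hle hhi h1 h2
      by_cases hlt : lo < hi
      · rw [pvBsearch, if_pos hlt]
        simp only []
        set mid := (lo + hi) / 2 with hmid
        have hmidlt : mid < lst.length := by omega
        have hgetd : lst.getD mid 0 = lst[mid] := List.getD_eq_getElem lst 0 hmidlt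
        by_cases hgt : lst.getD mid 0 > prev
        · rw [if_pos hgt]
          have hres := ih lo mid (by omega) (by omega) (by omega) h1
            (fun k hk h => lt_of_lt_of_le (hgetd ▸ hgt) (mono mid k hmidlt h hk))
          exact ⟨hres.1, by omega, hres.2.2.1, hres.2.2.2⟩
        · rw [if_neg hgt]
          rw [not_lt] at hgt
          rw [hgetd] at hgt
          have hres := ih (mid + 1) hi (by omega) (by omega) hhi
            (fun k hk h => le_trans (mono k mid h hmidlt (by omega)) hgt) h2
          exact ⟨by omega, hres.2.1, hres.2.2.1, hres.2.2.2⟩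
      · rw [pvBsearch, if_neg hlt]
        exact ⟨le_rfl, hle, h1, fun k hk h => h2 k (by omega) h⟩

theorem pvWalk_eq_greedy : ∀ (w : List Char) (abbr : List Char) (m : Nat),
    pvWalk (pvBuildAux PySem.Dict.empty 0 w) ((m : Int) - 1) abbr = pvGreedy abbr (w.drop m) := by
  intro w abbr
  induction abbr with
  | nil => intro m; simp [pvWalk, pvGreedy]
  | cons ch chs ih =>
      intro m
      have hget : (pvBuildAux PySem.Dict.empty 0 w).get? ch =
          (if pvOcc w ch 0 = [] then none else some (pvOcc w ch 0)) := by
        rw [pvBuildAux_get?]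
        simp [PySem.Dict.get?_empty, PySem.Dict.getD_empty]
      simp only [pvWalk]
      by_cases hocc : pvOcc w ch 0 = []
      · rw [hget, if_pos hocc]
        have hnm : ch ∉ w.drop m := fun hm => (pvOcc_nil_iff w ch 0).mp hocc (List.mem_of_mem_drop hm)
        have hd : (w.drop m).dropWhile (fun c => c ≠ ch) = [] :=
          List.dropWhile_eq_nil_iff.mpr (fun x hx => by
            simp only [ne_eq, decide_not, Bool.not_eq_eq_eq_not, Bool.not_true,
              decide_eq_false_iff_not]
            exact fun he => hnm (he ▸ hx))
        simp only [ne_eq, decide_not] at hd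
        simp [pvGreedy, hd]
      · rw [hget, if_neg hocc]
        set occ0 := pvOcc w ch 0 with hocc0
        set l := w.drop m with hl
        have hsorted := pvOcc_sorted w ch 0
        simp only []
        rw [PySem.List.pyGet?_neg_one, List.getLast?_eq_some_getLast (h := hocc)]
        simp only []
        set lastv := occ0.getLast hocc with hlast
        have hpredeq : (fun x : Int => decide (x ≤ (m : Int) - 1)) =
            (fun x : Int => decide (x < (0 : Int) + (m : Nat))) := by
          funext z; simp only [decide_eq_decide]; omega
        have hshift : occ0.dropWhile (fun x : Int => decide (x ≤ (m : Int) - 1)) = pvOcc l ch ((m : Nat) : Int) := by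
          rw [hpredeq]
          have := pvOcc_dropWhile w ch m 0
          simpa using this
        by_cases hle : lastv ≤ (m : Int) - 1
        · rw [if_pos hle]
          have hall : occ0.dropWhile (fun x : Int => decide (x ≤ (m : Int) - 1)) = [] :=
            List.dropWhile_eq_nil_iff.mpr (fun x hx => by
              simp only [decide_eq_true_eq]
              exact le_trans (sorted_le_getLast occ0 hsorted x hx hocc) hle)
          have hnm : ch ∉ l := (pvOcc_nil_iff l ch _).mp (hshift ▸ hall)
          have hd : l.dropWhile (fun c => c ≠ ch) = [] :=
            List.dropWhile_eq_nil_iff.mpr (fun x hx => by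
              simp only [ne_eq, decide_not, Bool.not_eq_eq_eq_not, Bool.not_true,
                decide_eq_false_iff_not]
              exact fun he => hnm (he ▸ hx))
          simp only [ne_eq, decide_not] at hd
          simp [pvGreedy, hd]
        · rw [if_neg hle]
          obtain ⟨-, -, hbelow, habove⟩ := pvBsearch_spec occ0 ((m : Int) - 1) hsorted 0 occ0.length
            (Nat.zero_le _) le_rfl (fun k hk h => absurd hk (by omega)) (fun k hk h => absurd h (by omega))
          set lo := pvBsearch occ0 ((m : Int) - 1) 0 occ0.length with hlo
          have hr : lo < occ0.length := by
            by_contra hge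
            rw [not_lt] at hge
            have hlen : 0 < occ0.length := List.length_pos_of_ne_nil hocc
            have := hbelow (occ0.length - 1) (by omega) (by omega)
            rw [← List.getLast_eq_getElem] at this
            · exact hle this
            · exact hocc
          rw [show Int.ofNat lo = ((lo : Nat) : Int) from rfl, PySem.List.pyGet?_natCast,
              List.getElem?_eq_getElem hr]
          set v := occ0[lo] with hv
          have hdrop : occ0.dropWhile (fun x : Int => decide (x ≤ (m : Int) - 1)) = occ0.drop lo :=
            dropWhile_eq_drop_of occ0 _ lo
              (fun k hk h => by simpa using hbelow k hk h)
              (fun k hk h => by simpa using habove k hk h)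
          have hocc_l : pvOcc l ch ((m : Nat) : Int) = v :: occ0.drop (lo + 1) := by
            rw [← hshift, hdrop, List.drop_eq_getElem_cons hr]
          obtain ⟨k, hvk, htake, -⟩ := pvOcc_head l ch _ _ _ hocc_l
          have hchmem : ch ∈ l := by
            by_contra hnm
            rw [(pvOcc_nil_iff l ch ((m : Nat) : Int)).mpr hnm] at hocc_l
            simp at hocc_l
          have hqne : l.dropWhile (fun c => c ≠ ch) ≠ [] := fun hnil => by
            simpa using List.dropWhile_eq_nil_iff.mp hnil ch hchmem
          obtain ⟨qh, qt, hq⟩ := List.exists_cons_of_ne_nil hqne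
          have htail : w.drop (m + k + 1) = qt := by
            have h1 : w.drop (m + k + 1) = l.drop (k + 1) := by
              rw [hl, List.drop_drop]
              try congr 1
              try omega
            rw [h1]
            conv_lhs => rw [← List.takeWhile_append_dropWhile (p := fun c => c ≠ ch) (l := l)]
            rw [show k + 1 = (l.takeWhile (fun c => c ≠ ch)).length + 1 by rw [htake],
                List.drop_append, List.drop_eq_nil_of_le (by omega), Nat.add_sub_cancel_left,
                List.drop_one, hq, List.tail_cons, List.nil_append]
          have hrec : pvWalk (pvBuildAux PySem.Dict.empty 0 w) v chs
              = pvGreedy chs qt := by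
            have := ih (m + k + 1)
            rw [htail] at this
            rw [← this]
            congr 1
            rw [hvk]
            push_cast
            ring
          simp only []
          rw [hrec]
          conv_rhs => rw [pvGreedy]
          rw [hq]

theorem pv_eq_all : ∀ (word_list : List String) (abbreviation : String),
    is_abbreviation_in_list word_list abbreviation = is_abbreviation_in_list_alt word_list abbreviation := by
  intro word_list abbreviation
  induction word_list with
  | nil => rfl
  | cons word rest ih =>
      simp only [is_abbreviation_in_list, is_abbreviation_in_list_alt]
      have hwalk : pvWalk (pvBuildAux PySem.Dict.empty 0 word.toList) (-1) abbreviation.toList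
          = pvGreedy abbreviation.toList word.toList := by
        have := pvWalk_eq_greedy word.toList abbreviation.toList 0
        simpa using this
      have h : (word.toList.foldl (pvStepA abbreviation.toList) 0 = abbreviation.toList.length)
          ↔ pvWalk (pvBuildAux PySem.Dict.empty 0 word.toList) (-1) abbreviation.toList = true := by
        rw [hwalk, foldl_stepA_iff_sublist word.toList abbreviation.toList 0 (Nat.zero_le _),
            pvGreedy_iff_sublist]
        simp
      by_cases hc : word.toList.foldl (pvStepA abbreviation.toList) 0 = abbreviation.toList.length
      · rw [if_pos hc, if_pos (h.mp hc)]
      · rw [if_neg hc, ih]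
        have : ¬ pvWalk (pvBuildAux PySem.Dict.empty 0 word.toList) (-1) abbreviation.toList = true :=
          fun hb => hc (h.mpr hb)
        simp [this]

-- ===== VERDICT (by name: the statement is the Claim_ definition above) =====
theorem is_abbreviation_in_list_spec : Claim_equal_is_abbreviation_in_list := by
  intro word_list abbreviation _
  unfold Spec_is_abbreviation_in_list
  exact pv_eq_all word_list abbreviation
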